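-- pv_equiv track=rewrite | github.com/JasperGuo/Unimer | executions/atis/lambda_calculus/transform.py | standardize_lambda_calculus_varnames
-- ===== SOURCE A (Python) =====
-- def standardize_lambda_calculus_varnames(ans):
--     toks = ans.split(' ')
--     varnames = {}
--     new_toks = []
--     for t in toks:
--         if t == 'x' or t.startswith('$'):
--             if ':' in t:
--                 # var definition
--                 splits = t.split(':')
--                 name, var_type = splits[0], splits[1]
--                 assert name not in varnames
--                 new_name = '$v%d' % len(varnames)
--                 varnames[name] = new_name
--                 new_toks.append(new_name + ":" + var_type)
--             else:
--                 # t is a variable name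
--                 if t in varnames:
--                     new_toks.append(varnames[t])
--                 else:
--                     new_varname = '$v%d' % len(varnames)
--                     varnames[t] = new_varname
--                     new_toks.append(new_varname)
--         else:
--             new_toks.append(t)
--     lf = ' '.join(new_toks)
--     return lf
-- ===== SOURCE B (Python) =====
-- def standardize_lambda_calculus_varnames(ans):
--     toks = ans.split(' ')
--
--     def varkey(t):
--         # variable tokens are the letter x alone or tokens with a dollar prefix; a definition
--         # token carries a colon-separated type after the name
--         if t == 'x' or t.startswith('$'):
--             return t.split(':')[0] if ':' in t else t
--         return None
--
--     # pass 1: distinct variable names in first-encounter order -> $v0, $v1, ...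
--     names = [k for k in map(varkey, toks) if k is not None]
--     mapping = {n: '$v%d' % i for i, n in enumerate(dict.fromkeys(names))}
--
--     # pass 2: pure rendering
--     def render(t):
--         if t == 'x' or t.startswith('$'):
--             if ':' in t:
--                 parts = t.split(':')
--                 return mapping[parts[0]] + ':' + parts[1]
--             return mapping[t]
--         return t
--
--     return ' '.join(map(render, toks))
-- ===== Notes on version B (the rewrite author's own statement) =====
-- stated objective: alternative
-- what changed: Replaces the single interleaved loop (which builds the rename dict and the output list simultaneously) by a pipeline: extract the variable-name stream with a key function, number the distinct names via dict.fromkeys + enumerate in one comprehension, then render the output with a pure per-token map.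
-- crash fix: On inputs whose token list contains a variable definition token whose name was already seen as a variable name earlier, A raises AssertionError; B returns the standardized string, reusing that variable's existing number. — e.g. on standardize_lambda_calculus_varnames("$a $a:e"): A raises AssertionError, B returns "$v0 $v0:e"
import Mathlib
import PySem

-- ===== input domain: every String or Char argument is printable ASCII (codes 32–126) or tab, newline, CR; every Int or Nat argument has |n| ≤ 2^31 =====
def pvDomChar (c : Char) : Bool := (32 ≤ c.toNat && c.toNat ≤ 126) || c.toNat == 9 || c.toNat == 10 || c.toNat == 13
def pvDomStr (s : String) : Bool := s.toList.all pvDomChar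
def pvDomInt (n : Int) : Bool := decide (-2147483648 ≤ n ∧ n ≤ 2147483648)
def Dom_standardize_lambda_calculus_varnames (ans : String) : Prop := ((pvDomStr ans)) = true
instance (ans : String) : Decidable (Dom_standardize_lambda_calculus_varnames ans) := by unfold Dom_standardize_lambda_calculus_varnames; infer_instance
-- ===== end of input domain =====

-- B replaces A's single interleaved loop (dict and output built together) by a pipeline:
-- extract variable names, number the distinct ones with dedup+enumerate, then render each
-- token with a pure map over the finished mapping; same O(n) cost, return values equal on Pre_.

-- ===== PORT A =====
-- one step of A's `for t in toks` loop; state = (varnames, new_toks)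
-- (the `assert name not in varnames` is the one raise site of A: inputs reaching it are excluded by Pre_)
def pvAStep (st : PySem.Dict String String × List String) (t : String) :
    PySem.Dict String String × List String :=
  if t == "x" || PySem.Str.startswith t "$" then
    if PySem.Str.isIn ":" t then
      -- var definition
      let splits := (PySem.Str.split? t ":").getD []   -- split? is none only for sep = "", never here
      let name := splits.getD 0 ""                     -- splits is nonempty, so [0]/[1] never raise
      let var_type := splits.getD 1 ""
      let new_name := "$v" ++ PySem.Int.toStr (st.1.size : Int)
      (st.1.insert name new_name, st.2 ++ [new_name ++ ":" ++ var_type])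
    else
      match st.1.get? t with
      | some v => (st.1, st.2 ++ [v])
      | none =>
          let new_varname := "$v" ++ PySem.Int.toStr (st.1.size : Int)
          (st.1.insert t new_varname, st.2 ++ [new_varname])
  else (st.1, st.2 ++ [t])

def standardize_lambda_calculus_varnames (ans : String) : String :=
  let toks := (PySem.Str.split? ans " ").getD []
  PySem.Str.join " " (toks.foldl pvAStep (PySem.Dict.empty, [])).2

-- ===== PORT B =====
-- varkey: the variable name a token contributes, or none for non-variable tokens
def pvVarkey? (t : String) : Option String :=
  if t == "x" || PySem.Str.startswith t "$" then
    some (if PySem.Str.isIn ":" t then ((PySem.Str.split? t ":").getD []).getD 0 "" else t)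
  else none

-- pass 1: {n: '$v%d' % i for i, n in enumerate(dict.fromkeys(names))}
def pvMapping (toks : List String) : PySem.Dict String String :=
  PySem.Dict.ofList
    ((PySem.List.enumerate (PySem.List.dedup (toks.filterMap pvVarkey?))).map
      (fun p => (p.2, "$v" ++ PySem.Int.toStr p.1)))

-- pass 2: pure rendering of one token (mapping[...] never raises: pass 1 covers every variable key)
def pvRender (m : PySem.Dict String String) (t : String) : String :=
  if t == "x" || PySem.Str.startswith t "$" then
    if PySem.Str.isIn ":" t then
      let parts := (PySem.Str.split? t ":").getD []
      m.getD (parts.getD 0 "") "" ++ ":" ++ parts.getD 1 ""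
    else m.getD t ""
  else t

def standardize_lambda_calculus_varnames_alt (ans : String) : String :=
  let toks := (PySem.Str.split? ans " ").getD []
  PySem.Str.join " " (toks.map (pvRender (pvMapping toks)))

-- ===== PRECONDITION & SPEC =====
-- helpers for the precondition: definition tokens and the name a token mentions
def pvIsDef (t : String) : Bool :=
  (t == "x" || PySem.Str.startswith t "$") && PySem.Str.isIn ":" t
def pvKeyStr (t : String) : String := ((PySem.Str.split? t ":").getD []).getD 0 ""

-- Pre_ excludes exactly the inputs on which A raises AssertionError: a variable definition
-- token whose name was already seen as a variable name earlier in the token list.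
def Pre_standardize_lambda_calculus_varnames (ans : String) : Prop :=
  ∀ i (h : i < ((PySem.Str.split? ans " ").getD []).length),
    pvIsDef ((PySem.Str.split? ans " ").getD [])[i] = true →
    pvKeyStr ((PySem.Str.split? ans " ").getD [])[i] ∉
      ((((PySem.Str.split? ans " ").getD []).take i).filterMap pvVarkey?)
instance (ans : String) : Decidable (Pre_standardize_lambda_calculus_varnames ans) := by
  unfold Pre_standardize_lambda_calculus_varnames; infer_instance

def pvWitness_standardize_lambda_calculus_varnames : String :=
  "( lambda $0:e ( pred $0 x x ) )"

-- On inputs whose token list contains a variable definition token whose name was already seen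
-- as a variable name, A raises AssertionError; B returns the standardized string reusing that
-- variable's number.
def Raises_standardize_lambda_calculus_varnames (ans : String) : Prop :=
  ∃ i, ∃ (h : i < ((PySem.Str.split? ans " ").getD []).length),
    pvIsDef ((PySem.Str.split? ans " ").getD [])[i] = true ∧
    pvKeyStr ((PySem.Str.split? ans " ").getD [])[i] ∈
      ((((PySem.Str.split? ans " ").getD []).take i).filterMap pvVarkey?)
instance (ans : String) : Decidable (Raises_standardize_lambda_calculus_varnames ans) := by
  unfold Raises_standardize_lambda_calculus_varnames; infer_instance
def pvRaiseWitness_standardize_lambda_calculus_varnames : String := "$a $a:e"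
def pvRaiseWitnessOut_standardize_lambda_calculus_varnames : String := "$v0 $v0:e"

def Spec_standardize_lambda_calculus_varnames (ans : String) (out : String) : Prop :=
  out = standardize_lambda_calculus_varnames_alt ans
instance (ans : String) (out : String) : Decidable (Spec_standardize_lambda_calculus_varnames ans out) := by
  unfold Spec_standardize_lambda_calculus_varnames; infer_instance

-- ===== CLAIM (what is proved, stated in full; the proofs are below) =====
def Claim_equal_standardize_lambda_calculus_varnames : Prop :=
  ∀ (ans : String), Dom_standardize_lambda_calculus_varnames ans →
    Pre_standardize_lambda_calculus_varnames ans →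
    Spec_standardize_lambda_calculus_varnames ans (standardize_lambda_calculus_varnames ans)

def Claim_raises_standardize_lambda_calculus_varnames : Prop :=
  (∀ (ans : String), Dom_standardize_lambda_calculus_varnames ans →
      Raises_standardize_lambda_calculus_varnames ans →
      ¬ Pre_standardize_lambda_calculus_varnames ans) ∧
  (Dom_standardize_lambda_calculus_varnames (pvRaiseWitness_standardize_lambda_calculus_varnames) ∧
   Raises_standardize_lambda_calculus_varnames (pvRaiseWitness_standardize_lambda_calculus_varnames) ∧
   standardize_lambda_calculus_varnames_alt (pvRaiseWitness_standardize_lambda_calculus_varnames) =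
     pvRaiseWitnessOut_standardize_lambda_calculus_varnames)

-- ===== LEMMAS AND PROOFS =====

-- the incremental mapping builder A's loop effectively runs over the stream of variable names
def pvStepM (d : PySem.Dict String String) (n : String) : PySem.Dict String String :=
  if d.contains n then d else d.insert n ("$v" ++ PySem.Int.toStr (d.size : Int))

def pvBuild (names : List String) : PySem.Dict String String :=
  names.foldl pvStepM PySem.Dict.empty

lemma pvBuild_append (ns ms : List String) :
    pvBuild (ns ++ ms) = ms.foldl pvStepM (pvBuild ns) := by
  simp [pvBuild, List.foldl_append]

lemma contains_foldl_pvStepM (ns : List String) (d : PySem.Dict String String) (k : String) :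
    (ns.foldl pvStepM d).contains k = (d.contains k || decide (k ∈ ns)) := by
  induction ns generalizing d with
  | nil => simp
  | cons n ns ih =>
      simp only [List.foldl_cons, ih, List.mem_cons]
      unfold pvStepM
      by_cases h : d.contains n = true
      · by_cases hk : k = n <;> simp [h, hk]
      · rw [if_neg h, PySem.Dict.contains_insert]
        by_cases hk : k = n
        · subst hk; simp [h]
        · have hb : (k == n) = false := beq_eq_false_iff_ne.mpr hk
          simp [hb, hk]

lemma contains_pvBuild (ns : List String) (k : String) :
    (pvBuild ns).contains k = decide (k ∈ ns) := by
  simpa [pvBuild] using contains_foldl_pvStepM ns PySem.Dict.empty k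

lemma get?_foldl_pvStepM_mono (ns : List String) (d : PySem.Dict String String) {k : String}
    {v : String} (h : d.get? k = some v) : (ns.foldl pvStepM d).get? k = some v := by
  induction ns generalizing d with
  | nil => simpa using h
  | cons n ns ih =>
      simp only [List.foldl_cons]
      apply ih
      unfold pvStepM
      by_cases hc : d.contains n = true
      · simpa [hc] using h
      · rw [if_neg hc, PySem.Dict.get?_insert_of_ne]
        · exact h
        · intro hk; subst hk
          rw [PySem.Dict.contains_eq_isSome_get?, h] at hc; simp at hc

-- enumerate appends
lemma enumerate_append_singleton {α : Type} (l : List α) (x : α) (s : Int) :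
    PySem.List.enumerate (l ++ [x]) s = PySem.List.enumerate l s ++ [(s + l.length, x)] := by
  induction l generalizing s with
  | nil => simp [PySem.List.enumerate]
  | cons a l ih =>
      simp [PySem.List.enumerate, ih]
      ring_nf

-- dedup appends
lemma dedup_append_singleton (ns : List String) (n : String) :
    PySem.List.dedup (ns ++ [n]) =
      if n ∈ ns then PySem.List.dedup ns else PySem.List.dedup ns ++ [n] := by
  have hof : PySem.Set.ofList (ns ++ [n]) = (PySem.Set.ofList ns).add n := by
    simp [PySem.Set.ofList, List.foldl_append]
  have hcon : (PySem.Set.ofList ns).contains n = true ↔ n ∈ ns := by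
    simp only [PySem.Set.contains, List.contains_iff_mem]
    exact PySem.Set.mem_ofList ns n
  rw [PySem.List.dedup_eq_ofList, PySem.List.dedup_eq_ofList, hof]
  unfold PySem.Set.add
  by_cases hm : n ∈ ns
  · rw [if_pos (hcon.mpr hm), if_pos hm]
  · rw [if_neg (fun h => hm (hcon.mp h)), if_neg hm]

-- pvBuild over a name stream equals B's enumerate-over-dedup comprehension, and its size
-- counts the distinct names seen so far
lemma pvBuild_eq_ofEnum (ns : List String) :
    pvBuild ns =
      PySem.Dict.ofList ((PySem.List.enumerate (PySem.List.dedup ns)).map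
        (fun p => (p.2, "$v" ++ PySem.Int.toStr p.1)))
    ∧ (pvBuild ns).size = (PySem.List.dedup ns).length := by
  induction ns using List.reverseRecOn with
  | nil => exact ⟨rfl, rfl⟩
  | append_singleton ns n ih =>
      rw [pvBuild_append, dedup_append_singleton]
      simp only [List.foldl_cons, List.foldl_nil]
      unfold pvStepM
      rw [contains_pvBuild]
      by_cases hm : n ∈ ns
      · simpa [hm] using ih
      · rw [if_neg (by simp [hm]), if_neg hm, enumerate_append_singleton]
        simp only [List.map_append, List.map_cons, List.map_nil]
        constructor
        · rw [show ∀ (ps : List (String × String)) (p : String × String),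
              PySem.Dict.ofList (ps ++ [p]) = (PySem.Dict.ofList ps).insert p.1 p.2 from
              fun ps p => by simp [PySem.Dict.ofList, PySem.Dict.update, List.foldl_append]]
          rw [← ih.1, ih.2]
          norm_num
        · rw [PySem.Dict.size_insert, if_neg (by rw [contains_pvBuild]; simp [hm])]
          simp [ih.2]

-- B's comprehension-built mapping IS the incremental builder run over the whole name stream
lemma pvMapping_eq_pvBuild (toks : List String) :
    pvMapping toks = pvBuild (toks.filterMap pvVarkey?) := by
  rw [pvMapping, (pvBuild_eq_ofEnum (toks.filterMap pvVarkey?)).1]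

-- freshness of every definition token, threaded left to right (proof-side restatement of Pre_)
def pvFreshRec : List String → List String → Prop
  | _, [] => True
  | ctx, t :: rest =>
      (pvIsDef t = true → pvKeyStr t ∉ ctx) ∧
      pvFreshRec (ctx ++ (pvVarkey? t).toList) rest

lemma pre_to_freshRec (toks ctx : List String)
    (h : ∀ i (hi : i < toks.length), pvIsDef toks[i] = true →
      pvKeyStr toks[i] ∉ ctx ++ ((toks.take i).filterMap pvVarkey?)) :
    pvFreshRec ctx toks := by
  induction toks generalizing ctx with
  | nil => trivial
  | cons t rest ih =>
      refine ⟨fun hd => by simpa using h 0 (by simp) (by simpa using hd), ?_⟩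
      apply ih
      intro i hi hd
      have := h (i + 1) (by simpa using Nat.succ_lt_succ hi) (by simpa using hd)
      intro hmem
      apply this
      cases hk : pvVarkey? t <;>
        simpa [List.take_succ_cons, List.filterMap_cons, hk] using hmem

-- main loop invariant: A's fold over the remaining tokens, started from the mapping built on the
-- names already consumed, emits exactly B's rendering under the final mapping
lemma pvMain (rest ctx acc : List String) (hf : pvFreshRec ctx rest) :
    (rest.foldl pvAStep (pvBuild ctx, acc)).2
      = acc ++ rest.map (pvRender (pvBuild (ctx ++ rest.filterMap pvVarkey?))) := by
  induction rest generalizing ctx acc with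
  | nil => simp
  | cons t rest ih =>
      obtain ⟨h1, h2⟩ := hf
      simp only [List.foldl_cons, List.map_cons]
      by_cases hv : (t == "x" || PySem.Str.startswith t "$") = true
      · by_cases hc : PySem.Str.isIn ":" t = true
        · -- definition token
          have hkt : pvVarkey? t = some (((PySem.Str.split? t ":").getD []).getD 0 "") := by
            unfold pvVarkey?; rw [if_pos hv, if_pos hc]
          set name := ((PySem.Str.split? t ":").getD []).getD 0 "" with hname
          set nn := "$v" ++ PySem.Int.toStr ((pvBuild ctx).size : Int) with hnn
          have hn : name ∉ ctx := h1 (by unfold pvIsDef; rw [hv, hc]; rfl)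
          have hncon : ¬ (pvBuild ctx).contains name = true := by
            rw [contains_pvBuild]; simpa using hn
          have hAB : pvAStep (pvBuild ctx, acc) t =
              ((pvBuild ctx).insert name nn,
               acc ++ [nn ++ ":" ++ ((PySem.Str.split? t ":").getD []).getD 1 ""]) := by
            unfold pvAStep; rw [if_pos hv, if_pos hc]
          have hbuild : pvBuild (ctx ++ [name]) = (pvBuild ctx).insert name nn := by
            rw [pvBuild_append]
            simp only [List.foldl_cons, List.foldl_nil]
            unfold pvStepM
            rw [if_neg hncon]
          have hfm : List.filterMap pvVarkey? (t :: rest)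
              = name :: List.filterMap pvVarkey? rest := by
            rw [List.filterMap_cons, hkt]
          rw [hfm, hAB, show ctx ++ name :: List.filterMap pvVarkey? rest
                = (ctx ++ [name]) ++ List.filterMap pvVarkey? rest by simp, ← hbuild]
          rw [hkt] at h2
          rw [ih (ctx ++ [name]) _ h2]
          have hM : (pvBuild ((ctx ++ [name]) ++ List.filterMap pvVarkey? rest)).getD name "" = nn := by
            rw [pvBuild_append, PySem.Dict.getD_eq_get?_getD,
              get?_foldl_pvStepM_mono _ _ (v := nn) (by rw [hbuild]; exact PySem.Dict.get?_insert_self _ _ _)]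
            rfl
          have hrender : pvRender (pvBuild ((ctx ++ [name]) ++ List.filterMap pvVarkey? rest)) t
              = nn ++ ":" ++ ((PySem.Str.split? t ":").getD []).getD 1 "" := by
            unfold pvRender
            rw [if_pos hv, if_pos hc]
            show (pvBuild ((ctx ++ [name]) ++ List.filterMap pvVarkey? rest)).getD name "" ++ ":" ++ _ = _
            rw [hM]
          rw [hrender]
          simp
        · -- plain variable token
          have hkt : pvVarkey? t = some t := by
            unfold pvVarkey?; rw [if_pos hv, if_neg hc]
          have hfm : List.filterMap pvVarkey? (t :: rest)
              = t :: List.filterMap pvVarkey? rest := by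
            rw [List.filterMap_cons, hkt]
          rw [hkt] at h2
          rw [hfm, show ctx ++ t :: List.filterMap pvVarkey? rest
                = (ctx ++ [t]) ++ List.filterMap pvVarkey? rest by simp]
          cases hg : (pvBuild ctx).get? t with
          | some v =>
              have hct : (pvBuild ctx).contains t = true := by
                rw [PySem.Dict.contains_eq_isSome_get?, hg]; rfl
              have hAB : pvAStep (pvBuild ctx, acc) t = (pvBuild ctx, acc ++ [v]) := by
                unfold pvAStep; rw [if_pos hv, if_neg hc, hg]
              have hbuild : pvBuild (ctx ++ [t]) = pvBuild ctx := by
                rw [pvBuild_append]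
                simp only [List.foldl_cons, List.foldl_nil]
                unfold pvStepM
                rw [if_pos hct]
              have hM : (pvBuild ((ctx ++ [t]) ++ List.filterMap pvVarkey? rest)).getD t "" = v := by
                rw [pvBuild_append, PySem.Dict.getD_eq_get?_getD,
                  get?_foldl_pvStepM_mono _ _ (v := v) (by rw [hbuild]; exact hg)]
                rfl
              have hrender : pvRender (pvBuild ((ctx ++ [t]) ++ List.filterMap pvVarkey? rest)) t = v := by
                unfold pvRender
                rw [if_pos hv, if_neg hc, hM]
              rw [hAB, ← hbuild, ih (ctx ++ [t]) _ h2, hrender]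
              simp
          | none =>
              have hct : ¬ (pvBuild ctx).contains t = true := by
                rw [PySem.Dict.contains_eq_isSome_get?, hg]; simp
              set nn := "$v" ++ PySem.Int.toStr ((pvBuild ctx).size : Int) with hnn
              have hAB : pvAStep (pvBuild ctx, acc) t = ((pvBuild ctx).insert t nn, acc ++ [nn]) := by
                unfold pvAStep; rw [if_pos hv, if_neg hc, hg]
              have hbuild : pvBuild (ctx ++ [t]) = (pvBuild ctx).insert t nn := by
                rw [pvBuild_append]
                simp only [List.foldl_cons, List.foldl_nil]
                unfold pvStepM
                rw [if_neg hct]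
              have hM : (pvBuild ((ctx ++ [t]) ++ List.filterMap pvVarkey? rest)).getD t "" = nn := by
                rw [pvBuild_append, PySem.Dict.getD_eq_get?_getD,
                  get?_foldl_pvStepM_mono _ _ (v := nn) (by rw [hbuild]; exact PySem.Dict.get?_insert_self _ _ _)]
                rfl
              have hrender : pvRender (pvBuild ((ctx ++ [t]) ++ List.filterMap pvVarkey? rest)) t = nn := by
                unfold pvRender
                rw [if_pos hv, if_neg hc, hM]
              rw [hAB, ← hbuild, ih (ctx ++ [t]) _ h2, hrender]
              simp
      · -- non-variable token
        have hkt : pvVarkey? t = none := by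
          unfold pvVarkey?; rw [if_neg hv]
        have hfm : List.filterMap pvVarkey? (t :: rest) = List.filterMap pvVarkey? rest := by
          rw [List.filterMap_cons, hkt]
        have hAB : pvAStep (pvBuild ctx, acc) t = (pvBuild ctx, acc ++ [t]) := by
          unfold pvAStep; rw [if_neg hv]
        have hrender : pvRender (pvBuild (ctx ++ List.filterMap pvVarkey? rest)) t = t := by
          unfold pvRender; rw [if_neg hv]
        simp only [hkt, Option.toList_none, List.append_nil] at h2
        rw [hfm, hAB, ih ctx _ h2, hrender]
        simp

-- ===== VERDICT (by name: the statement is the Claim_ definition above) =====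
theorem standardize_lambda_calculus_varnames_spec : Claim_equal_standardize_lambda_calculus_varnames := by
  intro ans _ hp
  unfold Spec_standardize_lambda_calculus_varnames
  unfold standardize_lambda_calculus_varnames standardize_lambda_calculus_varnames_alt
  simp only []
  rw [pvMapping_eq_pvBuild]
  congr 1
  have hfresh : pvFreshRec [] ((PySem.Str.split? ans " ").getD []) := by
    apply pre_to_freshRec
    intro i hi hd
    simpa using hp i hi hd
  have := pvMain ((PySem.Str.split? ans " ").getD []) [] [] hfresh
  simpa [pvBuild] using this

theorem standardize_lambda_calculus_varnames_raises : Claim_raises_standardize_lambda_calculus_varnames := by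
  unfold Claim_raises_standardize_lambda_calculus_varnames
  constructor
  · intro ans _ hr hp
    obtain ⟨i, hi, hd, hm⟩ := hr
    exact hp i hi hd hm
  · exact ⟨by decide, by decide, by decide⟩

-- self-check tying the two delivered results together (and recording both above)
theorem standardize_lambda_calculus_varnames_both_ok :
    Claim_equal_standardize_lambda_calculus_varnames ∧
      Claim_raises_standardize_lambda_calculus_varnames :=
  ⟨standardize_lambda_calculus_varnames_spec, standardize_lambda_calculus_varnames_raises⟩
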